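-- pv_equiv track=rewrite | github.com/elkakas314/VX_11 | attic/shubniggurath/ops/stem_ops.py | detect_roles
-- ===== SOURCE A (Python) =====
-- from typing import Dict, List
--
-- def detect_roles(stems: Dict[str, List[float]]) -> Dict[str, str]:
--     roles = {}
--     for name in stems.keys():
--         lower = name.lower()
--         if "vox" in lower or "voc" in lower:
--             roles[name] = "vocals"
--         elif "kick" in lower or "drum" in lower:
--             roles[name] = "drums"
--         elif "bass" in lower:
--             roles[name] = "bass"
--         else:
--             roles[name] = "instrument"
--     return roles
-- ===== SOURCE B (Python) =====
-- from typing import Dict, List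
--
-- # (keyword, priority): lower number = higher-priority role
-- KEYWORDS = (("vox", 0), ("voc", 0), ("kick", 1), ("drum", 1), ("bass", 2))
-- ROLES = ("vocals", "drums", "bass", "instrument")
--
-- def detect_roles(stems: Dict[str, List[float]]) -> Dict[str, str]:
--     out = {}
--     for name in stems:
--         low = name.lower()
--         best = 3  # priority of "instrument"
--         for i in range(len(low)):
--             for kw, p in KEYWORDS:
--                 if p < best and low.startswith(kw, i):
--                     best = p
--         out[name] = ROLES[best]
--     return out
-- ===== Notes on version B (the rewrite author's own statement) =====
-- stated objective: alternative
-- what changed: Replaces the priority-ordered if/elif substring tests with a single positional sweep over each lowercased name that collects every keyword match and keeps the minimum priority, mapping the final priority to a role.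
import Mathlib
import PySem

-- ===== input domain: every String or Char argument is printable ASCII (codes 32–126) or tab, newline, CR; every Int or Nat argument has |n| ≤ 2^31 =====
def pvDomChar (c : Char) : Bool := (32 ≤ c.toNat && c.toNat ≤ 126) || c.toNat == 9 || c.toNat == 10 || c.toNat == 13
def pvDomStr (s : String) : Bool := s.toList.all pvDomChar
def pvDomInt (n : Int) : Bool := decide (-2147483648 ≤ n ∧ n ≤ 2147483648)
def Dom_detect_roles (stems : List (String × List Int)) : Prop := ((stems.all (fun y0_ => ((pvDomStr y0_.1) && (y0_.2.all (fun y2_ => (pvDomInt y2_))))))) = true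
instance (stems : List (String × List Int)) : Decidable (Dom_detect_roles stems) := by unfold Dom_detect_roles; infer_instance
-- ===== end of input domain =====

-- B replaces the if/elif priority chain by a single positional sweep collecting every keyword match and keeping
-- the minimum priority; same return values (alternative decomposition, not faster).

-- ===== PORT A =====
def detect_roles (stems : List (String × List Int)) : List (String × String) :=
  (stems.foldl (fun roles p =>
    let lower := PySem.Str.lower p.1
    if PySem.Str.isIn "vox" lower || PySem.Str.isIn "voc" lower then
      roles.insert p.1 "vocals"
    else if PySem.Str.isIn "kick" lower || PySem.Str.isIn "drum" lower then
      roles.insert p.1 "drums"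
    else if PySem.Str.isIn "bass" lower then
      roles.insert p.1 "bass"
    else
      roles.insert p.1 "instrument") (PySem.Dict.empty)).items

-- ===== PORT B =====
-- Source B's KEYWORDS table of (keyword, priority) and the ROLES tuple
def kwTable : List (List Char × Nat) :=
  [("vox".toList, 0), ("voc".toList, 0), ("kick".toList, 1), ("drum".toList, 1), ("bass".toList, 2)]

def roleNames : List String := ["vocals", "drums", "bass", "instrument"]

-- Source B's inner double loop: for i in range(len(low)): for kw,p in KEYWORDS: if p < best and low.startswith(kw, i)
-- Python's low.startswith(kw, i) with 0 ≤ i is exactly Chars.startswith on (low.drop i).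
def sweep (low : List Char) : Nat :=
  (List.range low.length).foldl (fun best i =>
    kwTable.foldl (fun b kp =>
      if kp.2 < b && PySem.Chars.startswith (low.drop i) kp.1 then kp.2 else b) best) 3

def detect_roles_alt (stems : List (String × List Int)) : List (String × String) :=
  (stems.foldl (fun roles p =>
    let low := PySem.Chars.lower p.1.toList
    -- ROLES[best]: best ≤ 3 always (sweep only ever lowers 3), so getD's default is unreachable
    roles.insert p.1 (roleNames.getD (sweep low) "instrument")) (PySem.Dict.empty)).items

-- ===== PRECONDITION & SPEC =====
def Spec_detect_roles (stems : List (String × List Int)) (out : List (String × String)) : Prop := out = detect_roles_alt stems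
instance (stems : List (String × List Int)) (out : List (String × String)) : Decidable (Spec_detect_roles stems out) := by unfold Spec_detect_roles; infer_instance

-- ===== CLAIM (what is proved, stated in full; the proofs are below) =====
def Claim_equal_detect_roles : Prop := ∀ (stems : List (String × List Int)), Dom_detect_roles stems → Spec_detect_roles stems (detect_roles stems)

-- ===== LEMMAS AND PROOFS =====

-- the per-position score: priority of the best keyword starting at position i (3 if none)
def score (low : List Char) (i : Nat) : Nat :=
  if PySem.Chars.startswith (low.drop i) "vox".toList || PySem.Chars.startswith (low.drop i) "voc".toList then 0
  else if PySem.Chars.startswith (low.drop i) "kick".toList || PySem.Chars.startswith (low.drop i) "drum".toList then 1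
  else if PySem.Chars.startswith (low.drop i) "bass".toList then 2
  else 3

-- the inner keyword loop with the five match tests abstracted to booleans
theorem inner_gen (b : Nat) (hb : b ≤ 3) (m1 m2 m3 m4 m5 : Bool) :
    ([(("vox".toList : List Char), (0 : Nat), m1), ("voc".toList, 0, m2), ("kick".toList, 1, m3),
      ("drum".toList, 1, m4), ("bass".toList, 2, m5)]).foldl
      (fun b kp => if kp.2.1 < b && kp.2.2 then kp.2.1 else b) b
    = min b (if m1 || m2 then 0 else if m3 || m4 then 1 else if m5 then 2 else 3) := by
  cases m1 <;> cases m2 <;> cases m3 <;> cases m4 <;> cases m5 <;>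
    simp [Nat.min_def] <;> (first | omega | (split_ifs <;> omega))

-- Source B's inner keyword loop computes min b (score low i)
theorem inner_eq (low : List Char) (i : Nat) (b : Nat) (hb : b ≤ 3) :
    kwTable.foldl (fun b kp =>
      if kp.2 < b && PySem.Chars.startswith (low.drop i) kp.1 then kp.2 else b) b
    = min b (score low i) := by
  have h := inner_gen b hb (PySem.Chars.startswith (low.drop i) "vox".toList)
    (PySem.Chars.startswith (low.drop i) "voc".toList)
    (PySem.Chars.startswith (low.drop i) "kick".toList)
    (PySem.Chars.startswith (low.drop i) "drum".toList)
    (PySem.Chars.startswith (low.drop i) "bass".toList)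
  simpa only [kwTable, score, List.foldl] using h

-- the accumulator of Source B's position loop never exceeds 3
theorem fold_min_aux (low : List Char) (l : List Nat) (b : Nat) (hb : b ≤ 3) :
    l.foldl (fun best i => kwTable.foldl (fun b kp =>
      if kp.2 < b && PySem.Chars.startswith (low.drop i) kp.1 then kp.2 else b) best) b
    = l.foldl (fun b i => min b (score low i)) b := by
  induction l generalizing b with
  | nil => rfl
  | cons i l ih =>
    simp only [List.foldl]
    rw [inner_eq low i b hb, ih _ (le_trans (min_le_left _ _) hb)]


theorem foldl_min_le_iff (l : List Nat) (a k : Nat) :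
    l.foldl min a ≤ k ↔ a ≤ k ∨ ∃ x ∈ l, x ≤ k := by
  induction l generalizing a with
  | nil => simp
  | cons x l ih => simp only [List.foldl, ih, min_le_iff, List.mem_cons]; aesop

theorem le_foldl_min_iff (l : List Nat) (a k : Nat) :
    k ≤ l.foldl min a ↔ k ≤ a ∧ ∀ x ∈ l, k ≤ x := by
  induction l generalizing a with
  | nil => simp
  | cons x l ih => simp only [List.foldl, ih, le_min_iff, List.mem_cons]; aesop

-- a nonempty keyword occurs in low iff it starts at some position < low.length
theorem occurs_iff (low kw : List Char) (hkw : kw ≠ []) :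
    PySem.Chars.isIn kw low = true ↔
      ∃ i ∈ List.range low.length, PySem.Chars.startswith (low.drop i) kw = true := by
  rw [← PySem.Chars.exists_prefix_drop_iff_isIn]
  constructor
  · rintro ⟨j, hj⟩
    have hjlt : j < low.length := by
      by_contra h
      have : low.drop j = [] := List.drop_eq_nil_of_le (by omega)
      rw [this, List.prefix_nil] at hj
      exact hkw hj
    exact ⟨j, List.mem_range.mpr hjlt, (PySem.Chars.startswith_iff _ _).mpr hj⟩
  · rintro ⟨i, _, hi⟩
    exact ⟨i, (PySem.Chars.startswith_iff _ _).mp hi⟩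

-- if kw does not occur in low, it starts at no position
theorem not_starts (low kw : List Char) (hkw : kw ≠ []) (h : PySem.Chars.isIn kw low = false)
    (i : Nat) (hm : i ∈ List.range low.length) :
    PySem.Chars.startswith (low.drop i) kw = false := by
  by_contra hc
  rw [Bool.not_eq_false] at hc
  have ht := (occurs_iff low kw hkw).mpr ⟨i, hm, hc⟩
  rw [h] at ht
  exact Bool.false_ne_true ht

-- sweep equals the value of A's branch chain (conditions on the List Char side)
theorem sweep_eq (low : List Char) :
    sweep low =
      (if PySem.Chars.isIn "vox".toList low || PySem.Chars.isIn "voc".toList low then 0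
       else if PySem.Chars.isIn "kick".toList low || PySem.Chars.isIn "drum".toList low then 1
       else if PySem.Chars.isIn "bass".toList low then 2
       else 3) := by
  have hfold : sweep low = ((List.range low.length).map (score low)).foldl min 3 := by
    unfold sweep
    rw [fold_min_aux low _ 3 (le_refl 3), List.foldl_map]
  rw [hfold]
  have hle : ∀ k, (∃ i ∈ List.range low.length, score low i ≤ k) →
      ((List.range low.length).map (score low)).foldl min 3 ≤ k := by
    intro k hk
    obtain ⟨i, hmem, hsc⟩ := hk
    exact (foldl_min_le_iff _ _ _).mpr (Or.inr ⟨score low i, List.mem_map_of_mem hmem, hsc⟩)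
  have hge : ∀ k, k ≤ 3 → (∀ i ∈ List.range low.length, k ≤ score low i) →
      k ≤ ((List.range low.length).map (score low)).foldl min 3 := by
    intro k hk3 h
    refine (le_foldl_min_iff _ _ _).mpr ⟨hk3, ?_⟩
    intro x hx
    obtain ⟨i, hmem, rfl⟩ := List.mem_map.mp hx
    exact h i hmem
  split_ifs with hA hB hC
  · -- vocals
    refine Nat.le_antisymm (hle 0 ?_) (Nat.zero_le _)
    rcases Bool.or_eq_true_iff.mp hA with h | h
    · obtain ⟨i, hm, hs⟩ := (occurs_iff low _ (by decide)).mp h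
      exact ⟨i, hm, by simp only [score]; rw [hs]; simp⟩
    · obtain ⟨i, hm, hs⟩ := (occurs_iff low _ (by decide)).mp h
      exact ⟨i, hm, by simp only [score]; rw [hs]; simp⟩
  · -- drums
    simp only [Bool.or_eq_true_iff, not_or, Bool.not_eq_true] at hA
    refine Nat.le_antisymm (hle 1 ?_) (hge 1 (by omega) ?_)
    · rcases Bool.or_eq_true_iff.mp hB with h | h
      · obtain ⟨i, hm, hs⟩ := (occurs_iff low _ (by decide)).mp h
        refine ⟨i, hm, ?_⟩
        simp only [score]; rw [hs]; split_ifs <;> simp_all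
      · obtain ⟨i, hm, hs⟩ := (occurs_iff low _ (by decide)).mp h
        refine ⟨i, hm, ?_⟩
        simp only [score]; rw [hs]; split_ifs <;> simp_all
    · intro i hm
      have h1 := not_starts low "vox".toList (by decide) hA.1 i hm
      have h2 := not_starts low "voc".toList (by decide) hA.2 i hm
      simp only [score]; rw [h1, h2]; simp; split_ifs <;> omega
  · -- bass
    simp only [Bool.or_eq_true_iff, not_or, Bool.not_eq_true] at hA hB
    refine Nat.le_antisymm (hle 2 ?_) (hge 2 (by omega) ?_)
    · obtain ⟨i, hm, hs⟩ := (occurs_iff low _ (by decide)).mp hC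
      refine ⟨i, hm, ?_⟩
      simp only [score]; rw [hs]; split_ifs <;> simp_all
    · intro i hm
      have h1 := not_starts low "vox".toList (by decide) hA.1 i hm
      have h2 := not_starts low "voc".toList (by decide) hA.2 i hm
      have h3 := not_starts low "kick".toList (by decide) hB.1 i hm
      have h4 := not_starts low "drum".toList (by decide) hB.2 i hm
      simp only [score]; rw [h1, h2, h3, h4]; simp; split_ifs <;> omega
  · -- instrument
    simp only [Bool.or_eq_true_iff, not_or, Bool.not_eq_true] at hA hB
    rw [Bool.not_eq_true] at hC
    refine Nat.le_antisymm ((foldl_min_le_iff _ _ _).mpr (Or.inl (le_refl 3))) (hge 3 (le_refl 3) ?_)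
    intro i hm
    have h1 := not_starts low "vox".toList (by decide) hA.1 i hm
    have h2 := not_starts low "voc".toList (by decide) hA.2 i hm
    have h3 := not_starts low "kick".toList (by decide) hB.1 i hm
    have h4 := not_starts low "drum".toList (by decide) hB.2 i hm
    have h5 := not_starts low "bass".toList (by decide) hC i hm
    simp only [score]; rw [h1, h2, h3, h4, h5]; simp

-- A's per-name role equals B's per-name role
theorem role_eq (s : String) :
    (if PySem.Str.isIn "vox" (PySem.Str.lower s) || PySem.Str.isIn "voc" (PySem.Str.lower s) then "vocals"
     else if PySem.Str.isIn "kick" (PySem.Str.lower s) || PySem.Str.isIn "drum" (PySem.Str.lower s) then "drums"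
     else if PySem.Str.isIn "bass" (PySem.Str.lower s) then "bass"
     else "instrument")
    = roleNames.getD (sweep (PySem.Chars.lower s.toList)) "instrument" := by
  rw [sweep_eq]
  have hbr : ∀ sub : String, PySem.Str.isIn sub (PySem.Str.lower s)
      = PySem.Chars.isIn sub.toList (PySem.Chars.lower s.toList) := by
    intro sub
    simp [PySem.Str.isIn_eq, PySem.Str.toList_lower]
  rw [hbr "vox", hbr "voc", hbr "kick", hbr "drum", hbr "bass"]
  split_ifs <;> rfl

theorem fold_eq (stems : List (String × List Int)) (d : PySem.Dict String String) :
    stems.foldl (fun roles p =>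
      let lower := PySem.Str.lower p.1
      if PySem.Str.isIn "vox" lower || PySem.Str.isIn "voc" lower then
        roles.insert p.1 "vocals"
      else if PySem.Str.isIn "kick" lower || PySem.Str.isIn "drum" lower then
        roles.insert p.1 "drums"
      else if PySem.Str.isIn "bass" lower then
        roles.insert p.1 "bass"
      else
        roles.insert p.1 "instrument") d
    = stems.foldl (fun roles p =>
        roles.insert p.1 (roleNames.getD (sweep (PySem.Chars.lower p.1.toList)) "instrument")) d := by
  induction stems generalizing d with
  | nil => rfl
  | cons p rest ih =>
    simp only [List.foldl]
    rw [← ih]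
    congr 1
    rw [← role_eq p.1]
    split_ifs <;> rfl

-- ===== VERDICT (by name: the statement is the Claim_ definition above) =====
theorem detect_roles_spec : Claim_equal_detect_roles := by
  intro stems _
  unfold Spec_detect_roles detect_roles detect_roles_alt
  rw [fold_eq]
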